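-- pv_equiv track=rewrite | github.com/Ludeon/RimWorld-Polish | RimWorld_TranslationUpgrader.py | sort_tags_and_text_by_file
-- ===== SOURCE A (Python) =====
-- def sort_tags_and_text_by_file(file_tag_list):
--     filelist = []
--     filetaglist = []
--     newlist = []
--
--     for file, tag, text in file_tag_list:
--         if file not in filelist:
--             filelist.append(file)
--
--     for file in filelist:
--         for f, tag, text in file_tag_list:
--             if f == file:
--                 filetaglist.append((tag, text))
--
--         newlist.append((file, filetaglist))
--         filetaglist = []
--
--     return sorted(newlist)
-- ===== SOURCE B (Python) =====
-- def sort_tags_and_text_by_file(file_tag_list):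
--     out = []
--     for file, tag, text in sorted(file_tag_list, key=lambda r: r[0]):
--         if out and out[-1][0] == file:
--             out[-1][1].append((tag, text))
--         else:
--             out.append((file, [(tag, text)]))
--     return out
-- ===== Notes on version B (the rewrite author's own statement) =====
-- stated objective: faster
-- what changed: Replaces A's distinct-file enumeration with a full rescan of the input per file plus a final sort by a single stable sort on the file component followed by one linear grouping pass over consecutive equal-file rows.
import Mathlib
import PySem

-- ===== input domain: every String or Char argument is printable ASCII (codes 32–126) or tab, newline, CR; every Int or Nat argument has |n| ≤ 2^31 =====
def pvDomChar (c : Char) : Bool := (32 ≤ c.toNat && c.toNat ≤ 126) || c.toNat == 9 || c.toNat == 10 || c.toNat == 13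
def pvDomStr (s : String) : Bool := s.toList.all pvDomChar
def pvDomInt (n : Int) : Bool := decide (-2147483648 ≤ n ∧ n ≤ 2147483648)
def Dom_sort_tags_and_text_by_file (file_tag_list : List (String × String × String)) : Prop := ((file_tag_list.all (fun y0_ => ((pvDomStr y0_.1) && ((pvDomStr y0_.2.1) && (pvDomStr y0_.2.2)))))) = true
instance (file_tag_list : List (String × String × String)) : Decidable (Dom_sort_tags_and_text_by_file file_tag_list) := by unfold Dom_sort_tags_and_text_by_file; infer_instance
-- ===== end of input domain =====

-- B replaces A's per-distinct-file rescan of the whole input (plus a final sort) by one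
-- stable sort on the file component followed by a single linear grouping pass (faster).

-- ===== PORT A =====
-- Python A: collect distinct files in first-occurrence order, then for each file rescan
-- file_tag_list collecting (tag, text), then 'sorted(newlist)'.  The elements of newlist have
-- pairwise-distinct first components (filelist is duplicate-free), so Python's lexicographic
-- tuple comparison never reaches the second component: sorted(newlist) is exactly the stable
-- sort keyed on the first component, ported as such.
def sort_tags_and_text_by_file (file_tag_list : List (String × String × String)) : List (String × (List (String × String))) :=
  let filelist := file_tag_list.foldl
    (fun fl r => if fl.contains r.1 then fl else fl ++ [r.1]) []
  let newlist := filelist.foldl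
    (fun nl file => nl ++ [(file,
      file_tag_list.foldl
        (fun ftl r => if r.1 == file then ftl ++ [(r.2.1, r.2.2)] else ftl) [])]) []
  PySem.List.sorted newlist (fun p => p.1) false

-- ===== PORT B =====
-- Python B: stable-sort the rows by file, then one pass grouping consecutive equal-file rows;
-- 'out.append' / 'out[-1]' is ported as a fold over a reversed accumulator, reversed at the end.
def sort_tags_and_text_by_file_alt (file_tag_list : List (String × String × String)) : List (String × (List (String × String))) :=
  ((PySem.List.sorted file_tag_list (fun r => r.1) false).foldl
    (fun out r =>
      match out with
      | (g, es) :: rest =>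
          if g == r.1 then (g, es ++ [(r.2.1, r.2.2)]) :: rest
          else (r.1, [(r.2.1, r.2.2)]) :: (g, es) :: rest
      | [] => [(r.1, [(r.2.1, r.2.2)])]) []).reverse

-- ===== PRECONDITION & SPEC =====
def Spec_sort_tags_and_text_by_file (file_tag_list : List (String × String × String)) (out : List (String × (List (String × String)))) : Prop := out = sort_tags_and_text_by_file_alt file_tag_list
instance (file_tag_list : List (String × String × String)) (out : List (String × (List (String × String)))) : Decidable (Spec_sort_tags_and_text_by_file file_tag_list out) := by unfold Spec_sort_tags_and_text_by_file; infer_instance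

-- ===== CLAIM (what is proved, stated in full; the proofs are below) =====
def Claim_equal_sort_tags_and_text_by_file : Prop := ∀ (file_tag_list : List (String × String × String)), Dom_sort_tags_and_text_by_file file_tag_list → Spec_sort_tags_and_text_by_file file_tag_list (sort_tags_and_text_by_file file_tag_list)

-- ===== LEMMAS AND PROOFS =====

-- the (tag, text) projection
def pvProj (r : String × String × String) : String × String := (r.2.1, r.2.2)

-- the (tag, text) pairs of the rows of s whose file is f, in order
def pvE (s : List (String × String × String)) (f : String) : List (String × String) :=
  (s.filter (fun r => r.1 == f)).map pvProj

-- the grouping step of B's loop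
def pvStep (out : List (String × List (String × String))) (r : String × String × String) :
    List (String × List (String × String)) :=
  match out with
  | (g, es) :: rest =>
      if g == r.1 then (g, es ++ [(r.2.1, r.2.2)]) :: rest
      else (r.1, [(r.2.1, r.2.2)]) :: (g, es) :: rest
  | [] => [(r.1, [(r.2.1, r.2.2)])]

-- the common normal form both ports are reduced to
def pvC (l : List (String × String × String)) : List (String × (List (String × String))) :=
  (PySem.List.sorted (PySem.Set.ofList (l.map Prod.fst)) (fun x => x)).map
    (fun f => (f, pvE l f))

lemma pv_add_cons (a : String) (v : List String) (zs : List String) :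
    List.foldl PySem.Set.add (a :: v) zs
      = a :: List.foldl PySem.Set.add v (zs.filter (fun z => !(z == a))) := by
  induction zs generalizing v with
  | nil => rfl
  | cons z zs ih =>
    by_cases h : z = a
    · subst h
      have h1 : PySem.Set.add (z :: v) z = z :: v := by
        simp [PySem.Set.add, PySem.Set.contains]
      simp only [List.filter_cons, beq_self_eq_true, Bool.not_true, List.foldl_cons, h1, ih,
        Bool.false_eq_true, if_false]
    · have hc : (z == a) = false := by simp [h]
      have h1 : PySem.Set.add (a :: v) z = a :: PySem.Set.add v z := by
        simp only [PySem.Set.add, PySem.Set.contains,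
          List.contains_cons]
        have : (z == a) = false := hc
        rw [this]
        simp only [Bool.false_or]
        by_cases hv : z ∈ v <;> simp [hv]
      simp only [List.filter_cons, hc, Bool.not_false, List.foldl_cons, h1, ih,
        if_true]

lemma pv_ofList_sublist (zs v : List String) :
    List.Sublist (List.foldl PySem.Set.add v zs) (v ++ zs) := by
  induction zs generalizing v with
  | nil => simp
  | cons z zs ih =>
    rw [List.foldl_cons]
    by_cases h : (PySem.Set.contains v z) = true
    · have h1 : PySem.Set.add v z = v := by
        simp [PySem.Set.add, List.mem_of_elem_eq_true h]
      rw [h1]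
      exact (ih v).trans (List.Sublist.append_left (List.sublist_cons_self z zs) v)
    · have h1 : PySem.Set.add v z = v ++ [z] := by
        have : z ∉ v := fun hm => h (List.elem_eq_true_of_mem hm)
        simp [PySem.Set.add, this]
      rw [h1]
      have := ih (v ++ [z])
      simpa using this

lemma pv_insertBy_pairwise (x : String × String × String)
    (ys : List (String × String × String))
    (h : ys.Pairwise (fun a b => a.1 ≤ b.1)) :
    (PySem.List.insertBy (fun a b => decide (a.1 < b.1)) x ys).Pairwise
      (fun a b => a.1 ≤ b.1) := by
  induction ys with
  | nil => simp [PySem.List.insertBy]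
  | cons y ys ih =>
    rw [List.pairwise_cons] at h
    by_cases hb : x.1 < y.1
    · rw [show PySem.List.insertBy (fun a b => decide (a.1 < b.1)) x (y :: ys)
          = x :: y :: ys by simp [PySem.List.insertBy, hb]]
      refine List.Pairwise.cons ?_ (List.Pairwise.cons h.1 h.2)
      intro z hz
      rcases List.mem_cons.mp hz with hz | hz
      · exact hz ▸ le_of_lt hb
      · exact le_of_lt (lt_of_lt_of_le hb (h.1 z hz))
    · rw [show PySem.List.insertBy (fun a b => decide (a.1 < b.1)) x (y :: ys)
          = y :: PySem.List.insertBy (fun a b => decide (a.1 < b.1)) x ys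
        by simp [PySem.List.insertBy, hb]]
      refine List.Pairwise.cons ?_ (ih h.2)
      intro z hz
      rw [PySem.List.mem_insertBy] at hz
      rcases hz with hz | hz
      · exact hz ▸ le_of_not_gt hb
      · exact h.1 z hz

lemma pv_filter_insertBy (f : String) (x : String × String × String)
    (ys : List (String × String × String))
    (h : ys.Pairwise (fun a b => a.1 ≤ b.1)) :
    (PySem.List.insertBy (fun a b => decide (a.1 < b.1)) x ys).filter (fun r => r.1 == f)
      = ys.filter (fun r => r.1 == f) ++ if x.1 == f then [x] else [] := by
  induction ys with
  | nil => by_cases hf : x.1 = f <;> simp [PySem.List.insertBy, hf]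
  | cons y ys ih =>
    rw [List.pairwise_cons] at h
    by_cases hb : x.1 < y.1
    · rw [show PySem.List.insertBy (fun a b => decide (a.1 < b.1)) x (y :: ys)
          = x :: y :: ys by simp [PySem.List.insertBy, hb]]
      by_cases hf : x.1 = f
      · -- every element of y :: ys has file > f, so the filter of y :: ys is empty
        have hemp : (y :: ys).filter (fun r => r.1 == f) = [] := by
          rw [List.filter_eq_nil_iff]
          intro z hz
          have : f < z.1 := by
            rcases List.mem_cons.mp hz with hz | hz
            · exact hz ▸ (hf ▸ hb)
            · exact lt_of_lt_of_le (hf ▸ hb) (h.1 z hz)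
          simp [ne_of_gt this]
        rw [List.filter_cons_of_pos (by simp [hf]), hemp]
        simp [hf]
      · rw [List.filter_cons_of_neg (by simp [hf])]
        simp [hf]
    · rw [show PySem.List.insertBy (fun a b => decide (a.1 < b.1)) x (y :: ys)
          = y :: PySem.List.insertBy (fun a b => decide (a.1 < b.1)) x ys
        by simp [PySem.List.insertBy, hb]]
      by_cases hy : y.1 = f
      · rw [List.filter_cons_of_pos (by simp [hy]), List.filter_cons_of_pos (by simp [hy]),
          ih h.2]
        simp
      · rw [List.filter_cons_of_neg (by simp [hy]), List.filter_cons_of_neg (by simp [hy]),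
          ih h.2]

lemma pv_foldl_ins_filter (f : String) (l acc : List (String × String × String))
    (h : acc.Pairwise (fun a b => a.1 ≤ b.1)) :
    (l.foldl (fun a x => PySem.List.insertBy (fun a b => decide (a.1 < b.1)) x a) acc).filter
        (fun r => r.1 == f)
      = acc.filter (fun r => r.1 == f) ++ l.filter (fun r => r.1 == f) := by
  induction l generalizing acc with
  | nil => simp
  | cons x l ih =>
    rw [List.foldl_cons, ih _ (pv_insertBy_pairwise x acc h), pv_filter_insertBy f x acc h,
      List.filter_cons]
    by_cases hf : x.1 = f <;> simp [hf]

lemma pv_sorted_filter (f : String) (l : List (String × String × String)) :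
    (PySem.List.sorted l (fun r => r.1)).filter (fun r => r.1 == f)
      = l.filter (fun r => r.1 == f) := by
  rw [PySem.List.sorted_eq_foldl_insertBy]
  simpa using pv_foldl_ins_filter f l [] List.Pairwise.nil

lemma pvE_sorted (f : String) (l : List (String × String × String)) :
    pvE (PySem.List.sorted l (fun r => r.1)) f = pvE l f := by
  unfold pvE
  rw [pv_sorted_filter]

lemma pv_ofList_cons (a : String) (zs : List String) :
    PySem.Set.ofList (a :: zs) = a :: PySem.Set.ofList (zs.filter (fun z => !(z == a))) := by
  show List.foldl PySem.Set.add (PySem.Set.add PySem.Set.empty a) zs = _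
  rw [show PySem.Set.add PySem.Set.empty a = [a] from rfl]
  exact pv_add_cons a [] zs

lemma pv_filter_map_fst (q : String → Bool) (s : List (String × String × String)) :
    (s.map Prod.fst).filter q = (s.filter (fun y => q y.1)).map Prod.fst := by
  rw [List.filter_map]
  rfl

lemma pv_fold_inv (s : List (String × String × String)) (g : String)
    (es : List (String × String)) (rest : List (String × List (String × String)))
    (hs : s.Pairwise (fun a b => a.1 ≤ b.1)) (hg : ∀ x ∈ s, g ≤ x.1) :
    (s.foldl pvStep ((g, es) :: rest)).reverse
      = rest.reverse ++ (g, es ++ pvE s g) ::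
          (PySem.Set.ofList ((s.filter (fun x => !(x.1 == g))).map Prod.fst)).map
            (fun f => (f, pvE s f)) := by
  induction s generalizing g es rest with
  | nil => simp [pvE]
  | cons x s ih =>
    rw [List.pairwise_cons] at hs
    obtain ⟨hx, hs'⟩ := hs
    have hgx : g ≤ x.1 := hg x (List.mem_cons_self ..)
    rw [List.foldl_cons]
    by_cases h : g = x.1
    · -- x joins the current group
      rw [show pvStep ((g, es) :: rest) x = (g, es ++ [pvProj x]) :: rest by
            simp [pvStep, pvProj, h],
        ih g (es ++ [pvProj x]) rest hs' (fun y hy => hg y (List.mem_cons_of_mem x hy))]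
      have e1 : pvE (x :: s) g = pvProj x :: pvE s g := by
        unfold pvE
        rw [List.filter_cons_of_pos (by simp [h])]
        rfl
      have e2 : (x :: s).filter (fun y => !(y.1 == g)) = s.filter (fun y => !(y.1 == g)) := by
        rw [List.filter_cons_of_neg (by simp [h])]
      have e3 : ∀ f ∈ PySem.Set.ofList ((s.filter (fun y => !(y.1 == g))).map Prod.fst),
          pvE s f = pvE (x :: s) f := by
        intro f hf
        rw [PySem.Set.mem_ofList] at hf
        simp only [List.mem_map, List.mem_filter] at hf
        obtain ⟨y, ⟨_, hyg⟩, rfl⟩ := hf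
        have hyne : y.1 ≠ g := by simpa using hyg
        unfold pvE
        rw [List.filter_cons_of_neg (by
          simp only [beq_iff_eq]
          rw [← h]
          exact fun e => hyne e.symm)]
      have e6 : (PySem.Set.ofList ((s.filter (fun y => !(y.1 == g))).map Prod.fst)).map
            (fun f => (f, pvE s f))
          = (PySem.Set.ofList ((s.filter (fun y => !(y.1 == g))).map Prod.fst)).map
            (fun f => (f, pvE (x :: s) f)) :=
        List.map_congr_left fun f hf => by rw [e3 f hf]
      rw [e1, e2, e6]
      simp
    · -- x opens a new group
      have hlt : g < x.1 := lt_of_le_of_ne hgx h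
      rw [show pvStep ((g, es) :: rest) x = (x.1, [pvProj x]) :: (g, es) :: rest by
            simp [pvStep, pvProj, h],
        ih x.1 [pvProj x] ((g, es) :: rest) hs' hx]
      have e0 : pvE (x :: s) g = [] := by
        unfold pvE
        rw [List.filter_eq_nil_iff.mpr, List.map_nil]
        intro y hy
        rcases List.mem_cons.mp hy with hy | hy
        · simp [hy, ne_of_gt hlt]
        · simp [ne_of_gt (lt_of_lt_of_le hlt (hx y hy))]
      have e1 : (x :: s).filter (fun y => !(y.1 == g)) = x :: s := by
        rw [List.filter_eq_self]
        intro y hy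
        rcases List.mem_cons.mp hy with hy | hy
        · simp [hy, ne_of_gt hlt]
        · simp [ne_of_gt (lt_of_lt_of_le hlt (hx y hy))]
      have e4 : pvE (x :: s) x.1 = pvProj x :: pvE s x.1 := by
        unfold pvE
        rw [List.filter_cons_of_pos (by simp)]
        rfl
      have e5 : ∀ f ∈ PySem.Set.ofList ((s.filter (fun y => !(y.1 == x.1))).map Prod.fst),
          pvE s f = pvE (x :: s) f := by
        intro f hf
        rw [PySem.Set.mem_ofList] at hf
        simp only [List.mem_map, List.mem_filter] at hf
        obtain ⟨y, ⟨_, hyg⟩, rfl⟩ := hf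
        have hyne : y.1 ≠ x.1 := by simpa using hyg
        unfold pvE
        rw [List.filter_cons_of_neg (by
          simp only [beq_iff_eq]
          exact fun e => hyne e.symm)]
      have e6 : (PySem.Set.ofList ((s.filter (fun y => !(y.1 == x.1))).map Prod.fst)).map
            (fun f => (f, pvE s f))
          = (PySem.Set.ofList ((s.filter (fun y => !(y.1 == x.1))).map Prod.fst)).map
            (fun f => (f, pvE (x :: s) f)) :=
        List.map_congr_left fun f hf => by rw [e5 f hf]
      rw [e0, e1, List.map_cons, pv_ofList_cons, pv_filter_map_fst, List.map_cons, e4, e6]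
      simp

lemma pv_group_eq (s : List (String × String × String))
    (hs : s.Pairwise (fun a b => a.1 ≤ b.1)) :
    (s.foldl pvStep []).reverse
      = (PySem.Set.ofList (s.map Prod.fst)).map (fun f => (f, pvE s f)) := by
  match s with
  | [] => rfl
  | x :: s =>
    rw [List.pairwise_cons] at hs
    obtain ⟨hx, hs'⟩ := hs
    rw [List.foldl_cons, show pvStep [] x = [(x.1, [pvProj x])] from rfl,
      pv_fold_inv s x.1 [pvProj x] [] hs' hx]
    have e4 : pvE (x :: s) x.1 = pvProj x :: pvE s x.1 := by
      unfold pvE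
      rw [List.filter_cons_of_pos (by simp)]
      rfl
    have e5 : ∀ f ∈ PySem.Set.ofList ((s.filter (fun y => !(y.1 == x.1))).map Prod.fst),
        pvE s f = pvE (x :: s) f := by
      intro f hf
      rw [PySem.Set.mem_ofList] at hf
      simp only [List.mem_map, List.mem_filter] at hf
      obtain ⟨y, ⟨_, hyg⟩, rfl⟩ := hf
      have hyne : y.1 ≠ x.1 := by simpa using hyg
      unfold pvE
      rw [List.filter_cons_of_neg (by
        simp only [beq_iff_eq]
        exact fun e => hyne e.symm)]
    have e6 : (PySem.Set.ofList ((s.filter (fun y => !(y.1 == x.1))).map Prod.fst)).map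
          (fun f => (f, pvE s f))
        = (PySem.Set.ofList ((s.filter (fun y => !(y.1 == x.1))).map Prod.fst)).map
          (fun f => (f, pvE (x :: s) f)) :=
      List.map_congr_left fun f hf => by rw [e5 f hf]
    rw [List.map_cons, pv_ofList_cons, pv_filter_map_fst, List.map_cons, e4, e6]
    simp

lemma pv_files_sorted (l : List (String × String × String)) :
    PySem.Set.ofList ((PySem.List.sorted l (fun r => r.1)).map Prod.fst)
      = PySem.List.sorted (PySem.Set.ofList (l.map Prod.fst)) (fun x => x) := by
  symm
  apply PySem.List.sorted_eq_of_perm_of_pairwise_lt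
  · apply List.perm_of_nodup_nodup_toFinset_eq (PySem.Set.nodup_ofList _)
      (PySem.Set.nodup_ofList _)
    ext f
    simp [PySem.Set.mem_ofList, PySem.List.mem_sorted]
  · have h1 : ((PySem.List.sorted l (fun r => r.1)).map Prod.fst).Pairwise (· ≤ ·) :=
      List.pairwise_map.mpr (PySem.List.sorted_pairwise l (fun r => r.1))
    have hsub := pv_ofList_sublist ((PySem.List.sorted l (fun r => r.1)).map Prod.fst) []
    rw [List.nil_append] at hsub
    have h2 : (PySem.Set.ofList ((PySem.List.sorted l (fun r => r.1)).map Prod.fst)).Pairwise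
        (· ≤ ·) := h1.sublist hsub
    have h3 : (PySem.Set.ofList ((PySem.List.sorted l (fun r => r.1)).map Prod.fst)).Pairwise
        (fun a b => a ≠ b) := PySem.Set.nodup_ofList _
    exact (h2.and h3).imp fun hab => lt_of_le_of_ne hab.1 hab.2

lemma pv_sorted_map (zs : List String) (E : String → List (String × String)) :
    PySem.List.sorted ((PySem.Set.ofList zs).map (fun f => (f, E f))) (fun p => p.1)
      = (PySem.List.sorted (PySem.Set.ofList zs) (fun x => x)).map (fun f => (f, E f)) := by
  apply PySem.List.sorted_eq_of_perm_of_pairwise_lt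
  · exact (PySem.List.sorted_perm _ _ _).map _
  · exact List.pairwise_map.mpr (PySem.List.sorted_ofList_pairwise_lt zs)

lemma pv_B_eq (l : List (String × String × String)) :
    sort_tags_and_text_by_file_alt l = pvC l := by
  have h0 : sort_tags_and_text_by_file_alt l
      = ((PySem.List.sorted l (fun r => r.1)).foldl pvStep []).reverse := rfl
  rw [h0, pv_group_eq _ (PySem.List.sorted_pairwise l (fun r => r.1)), pv_files_sorted]
  unfold pvC
  exact List.map_congr_left fun f _ => by rw [pvE_sorted]

lemma pv_A_eq (l : List (String × String × String)) :
    sort_tags_and_text_by_file l = pvC l := by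
  have h0 : sort_tags_and_text_by_file l
      = PySem.List.sorted
          ((l.foldl (fun fl r => if fl.contains r.1 then fl else fl ++ [r.1]) []).foldl
            (fun nl file => nl ++ [(file, l.foldl
              (fun ftl r => if r.1 == file then ftl ++ [(r.2.1, r.2.2)] else ftl) [])]) [])
          (fun p => p.1) := rfl
  have hfl : l.foldl (fun fl r => if fl.contains r.1 then fl else fl ++ [r.1]) []
      = PySem.Set.ofList (l.map Prod.fst) := by
    rw [show PySem.Set.ofList (l.map Prod.fst)
        = List.foldl PySem.Set.add [] (l.map Prod.fst) from rfl, List.foldl_map]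
    rfl
  have hnew : (PySem.Set.ofList (l.map Prod.fst)).foldl
        (fun nl file => nl ++ [(file, l.foldl
          (fun ftl r => if r.1 == file then ftl ++ [(r.2.1, r.2.2)] else ftl) [])]) []
      = [] ++ (PySem.Set.ofList (l.map Prod.fst)).map
          (fun file => (file, l.foldl
            (fun ftl r => if r.1 == file then ftl ++ [(r.2.1, r.2.2)] else ftl) [])) :=
    PySem.List.foldl_append_singleton_eq_map _ _ _
  have hinner : ∀ file, l.foldl
      (fun ftl r => if r.1 == file then ftl ++ [(r.2.1, r.2.2)] else ftl) [] = pvE l file := by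
    intro file
    rw [PySem.List.foldl_append_if (fun r => r.1 == file) (fun r => (r.2.1, r.2.2)) l []]
    rfl
  rw [h0, hfl, hnew, List.nil_append,
    List.map_congr_left (fun f _ => by rw [hinner f] :
      ∀ f ∈ PySem.Set.ofList (l.map Prod.fst),
        (f, l.foldl (fun ftl r => if r.1 == f then ftl ++ [(r.2.1, r.2.2)] else ftl) [])
          = (f, pvE l f))]
  exact pv_sorted_map (l.map Prod.fst) (pvE l)

-- ===== VERDICT (by name: the statement is the Claim_ definition above) =====
theorem sort_tags_and_text_by_file_spec : Claim_equal_sort_tags_and_text_by_file := by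
  intro l _
  unfold Spec_sort_tags_and_text_by_file
  rw [pv_A_eq, pv_B_eq]
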